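-- pv_equiv track=rewrite | github.com/kineflas/taleem-backend | app/routers/diagnostic.py | _calculate_diagnostic_level
-- ===== SOURCE A (Python) =====
-- def _calculate_diagnostic_level(score: int) -> tuple[str, str]:
--     """
--     Calculate level based on score (0-10).
--
--     Returns:
--         (level_name, level_message)
--     """
--     levels = {
--         (0, 2): (
--             "explorateur",
--             "Tu débutes une aventure incroyable...",
--         ),
--         (3, 4): (
--             "voyageur",
--             "Tu as déjà les bases...",
--         ),
--         (5, 6): (
--             "chercheur",
--             "Tes fondations sont solides...",
--         ),
--         (7, 8): (
--             "savant",
--             "Impressionnant...",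
--         ),
--         (9, 10): (
--             "gardien",
--             "Tu maîtrises le Tome 1...",
--         ),
--     }
--
--     for (min_score, max_score), (level_name, message) in levels.items():
--         if min_score <= score <= max_score:
--             return level_name, message
--
--     # Default fallback
--     return "explorateur", "Tu débutes une aventure incroyable..."
-- ===== SOURCE B (Python) =====
-- import bisect
--
-- _THRESHOLDS = [3, 5, 7, 9]
-- _LEVELS = [
--     ("explorateur", "Tu débutes une aventure incroyable..."),
--     ("voyageur", "Tu as déjà les bases..."),
--     ("chercheur", "Tes fondations sont solides..."),
--     ("savant", "Impressionnant..."),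
--     ("gardien", "Tu maîtrises le Tome 1..."),
-- ]
--
--
-- def _calculate_diagnostic_level(score: int) -> tuple[str, str]:
--     if score < 0 or score > 10:
--         return _LEVELS[0]
--     return _LEVELS[bisect.bisect_right(_THRESHOLDS, score)]
-- ===== Notes on version B (the rewrite author's own statement) =====
-- stated objective: idiomatic
-- what changed: Replaces the linear scan over a dict of (min,max) range keys by a threshold table plus bisect_right lookup, with an explicit out-of-range guard returning the default.
import Mathlib
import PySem

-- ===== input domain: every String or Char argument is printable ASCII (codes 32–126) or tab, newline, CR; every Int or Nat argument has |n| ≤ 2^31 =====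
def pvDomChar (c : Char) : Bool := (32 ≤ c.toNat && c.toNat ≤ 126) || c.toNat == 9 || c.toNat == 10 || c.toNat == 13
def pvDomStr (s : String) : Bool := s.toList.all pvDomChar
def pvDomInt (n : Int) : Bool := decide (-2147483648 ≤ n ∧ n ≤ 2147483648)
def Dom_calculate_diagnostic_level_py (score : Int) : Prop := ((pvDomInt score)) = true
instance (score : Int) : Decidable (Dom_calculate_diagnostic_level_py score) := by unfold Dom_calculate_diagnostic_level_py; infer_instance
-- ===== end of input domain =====

-- ===== PORT A =====
-- B replaces A's linear scan over range-keyed dict entries with a threshold table + bisect lookup (idiomatic).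
def pvLevelsA : List ((Int × Int) × (String × String)) :=
  [((0, 2), ("explorateur", "Tu débutes une aventure incroyable...")),
   ((3, 4), ("voyageur", "Tu as déjà les bases...")),
   ((5, 6), ("chercheur", "Tes fondations sont solides...")),
   ((7, 8), ("savant", "Impressionnant...")),
   ((9, 10), ("gardien", "Tu maîtrises le Tome 1..."))]

-- the for-loop with early return over levels.items()
def pvScanA (score : Int) : List ((Int × Int) × (String × String)) → String × String
  | [] => ("explorateur", "Tu débutes une aventure incroyable...")
  | ((mn, mx), nm) :: rest =>
      if mn ≤ score ∧ score ≤ mx then nm else pvScanA score rest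

def calculate_diagnostic_level_py (score : Int) : String × String :=
  pvScanA score pvLevelsA

-- ===== PORT B =====
def pvTHRESHOLDS : List Int := [3, 5, 7, 9]
def pvLEVELS : List (String × String) :=
  [("explorateur", "Tu débutes une aventure incroyable..."),
   ("voyageur", "Tu as déjà les bases..."),
   ("chercheur", "Tes fondations sont solides..."),
   ("savant", "Impressionnant..."),
   ("gardien", "Tu maîtrises le Tome 1...")]

-- bisect.bisect_right on the sorted threshold list = number of leading elements ≤ score
def pvBisectRight (xs : List Int) (x : Int) : Nat :=
  (xs.takeWhile (fun t => decide (t ≤ x))).length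

def calculate_diagnostic_level_py_alt (score : Int) : String × String :=
  if score < 0 ∨ 10 < score then pvLEVELS.getD 0 ("", "")
  else pvLEVELS.getD (pvBisectRight pvTHRESHOLDS score) ("", "")

-- ===== PRECONDITION & SPEC =====
def Spec_calculate_diagnostic_level_py (score : Int) (out : String × String) : Prop := out = calculate_diagnostic_level_py_alt score
instance (score : Int) (out : String × String) : Decidable (Spec_calculate_diagnostic_level_py score out) := by unfold Spec_calculate_diagnostic_level_py; infer_instance

-- ===== CLAIM (what is proved, stated in full; the proofs are below) =====
def Claim_equal_calculate_diagnostic_level_py : Prop := ∀ (score : Int), Dom_calculate_diagnostic_level_py score → Spec_calculate_diagnostic_level_py score (calculate_diagnostic_level_py score)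

-- ===== LEMMAS AND PROOFS =====
theorem pv_bisect (s : Int) :
    pvBisectRight pvTHRESHOLDS s =
      if s < 3 then 0 else if s < 5 then 1 else if s < 7 then 2 else if s < 9 then 3 else 4 := by
  by_cases h3 : 3 ≤ s <;> by_cases h5 : 5 ≤ s <;> by_cases h7 : 7 ≤ s <;> by_cases h9 : 9 ≤ s <;>
    simp [pvBisectRight, pvTHRESHOLDS, List.takeWhile, h3, h5, h7, h9] <;>
    first | omega | (split_ifs <;> omega)

theorem pv_eq (score : Int) :
    calculate_diagnostic_level_py score = calculate_diagnostic_level_py_alt score := by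
  unfold calculate_diagnostic_level_py calculate_diagnostic_level_py_alt
  rw [pv_bisect]
  unfold pvLevelsA pvLEVELS
  simp only [pvScanA]
  split_ifs <;> first | rfl | omega

-- ===== VERDICT (by name: the statement is the Claim_ definition above) =====
theorem calculate_diagnostic_level_py_spec : Claim_equal_calculate_diagnostic_level_py := by
  intro score _
  unfold Spec_calculate_diagnostic_level_py
  exact pv_eq score
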